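-- pv_equiv track=rewrite | github.com/sharmarnavv/git-gud | resume_parser/education_scoring.py | _infer_field_from_skills
-- ===== SOURCE A (Python) =====
-- from typing import Dict, List, Tuple, Optional, Any, Set
--
-- def _infer_field_from_skills(skills: List[str]) -> Optional[str]:
--     """Infer field of study from technical skills.
--
--     Args:
--         skills: List of technical skills
--
--     Returns:
--         Inferred field of study or None
--     """
--     skills_lower = [skill.lower() for skill in skills]
--
--     # Field inference rules
--     field_indicators = {
--         'computer science': ['python', 'java', 'javascript', 'programming', 'software', 'algorithms'],
--         'data science': ['machine learning', 'data analysis', 'statistics', 'python', 'r'],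
--         'engineering': ['matlab', 'autocad', 'solidworks', 'engineering'],
--         'business': ['project management', 'business analysis', 'strategy'],
--         'finance': ['financial analysis', 'accounting', 'excel', 'financial modeling'],
--         'marketing': ['digital marketing', 'seo', 'social media', 'marketing'],
--         'design': ['photoshop', 'illustrator', 'ui/ux', 'design']
--     }
--
--     field_scores = {}
--     for field, indicators in field_indicators.items():
--         score = sum(1 for indicator in indicators if any(indicator in skill for skill in skills_lower))
--         if score > 0:
--             field_scores[field] = score
--
--     if field_scores:
--         return max(field_scores, key=field_scores.get)
--
--     return None
-- ===== SOURCE B (Python) =====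
-- from typing import List, Optional
--
-- def _infer_field_from_skills(skills: List[str]) -> Optional[str]:
--     """Infer field of study from technical skills (two staged passes:
--     a skill-major matched-indicator set, then field scoring off that set)."""
--     field_indicators = {
--         'computer science': ['python', 'java', 'javascript', 'programming', 'software', 'algorithms'],
--         'data science': ['machine learning', 'data analysis', 'statistics', 'python', 'r'],
--         'engineering': ['matlab', 'autocad', 'solidworks', 'engineering'],
--         'business': ['project management', 'business analysis', 'strategy'],
--         'finance': ['financial analysis', 'accounting', 'excel', 'financial modeling'],
--         'marketing': ['digital marketing', 'seo', 'social media', 'marketing'],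
--         'design': ['photoshop', 'illustrator', 'ui/ux', 'design']
--     }
--
--     # Phase 1: traverse SKILLS in the outer loop, collecting the set of distinct
--     # indicators that occur as a substring of at least one lowercased skill.
--     all_indicators = list(dict.fromkeys(
--         ind for inds in field_indicators.values() for ind in inds))
--     matched = set()
--     for skill in skills:
--         sk = skill.lower()
--         for ind in all_indicators:
--             if ind in sk:
--                 matched.add(ind)
--
--     # Phase 2: score each field against the matched set; keep the first field
--     # with a strictly greater score (None when nothing matched).
--     best: Optional[str] = None
--     best_score = 0
--     for field, inds in field_indicators.items():
--         score = sum(1 for i in inds if i in matched)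
--         if score > best_score:
--             best, best_score = field, score
--     return best
-- ===== Notes on version B (the rewrite author's own statement) =====
-- stated objective: faster
-- what changed: B restructures the work into two staged passes: a skill-major pass builds the set of distinct matched indicators once (each of the 25 distinct indicators, e.g. the shared 'python', is substring-tested once per skill), then fields are scored by O(1) set membership with a strict '>' running best, replacing A's field-major nested substring scans, score dict and final max(..., key=...) reduce.
import Mathlib
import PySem

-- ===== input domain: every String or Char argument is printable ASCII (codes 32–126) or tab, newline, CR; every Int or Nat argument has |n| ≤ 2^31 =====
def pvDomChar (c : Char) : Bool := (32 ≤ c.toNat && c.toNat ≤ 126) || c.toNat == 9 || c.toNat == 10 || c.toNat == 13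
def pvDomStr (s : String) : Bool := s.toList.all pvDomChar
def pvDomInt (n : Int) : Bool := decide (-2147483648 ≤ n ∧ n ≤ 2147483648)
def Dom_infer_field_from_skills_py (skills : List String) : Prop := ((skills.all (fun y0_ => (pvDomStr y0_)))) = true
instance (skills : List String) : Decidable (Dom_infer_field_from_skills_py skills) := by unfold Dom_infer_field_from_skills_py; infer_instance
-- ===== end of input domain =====

-- B stages the work differently: a skill-major pass builds the set of matched distinct
-- indicators once, then fields are scored by set membership with a strict-'>' running best
-- (objective: faster by a constant factor — each distinct indicator is substring-tested once per skill
-- instead of once per (field, indicator) occurrence; same result, including first-max ties and None).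


-- the field_indicators dict literal (insertion order), shared data of both Pythons
def pvFieldIndicators : List (String × List String) :=
  [("computer science", ["python", "java", "javascript", "programming", "software", "algorithms"]),
   ("data science", ["machine learning", "data analysis", "statistics", "python", "r"]),
   ("engineering", ["matlab", "autocad", "solidworks", "engineering"]),
   ("business", ["project management", "business analysis", "strategy"]),
   ("finance", ["financial analysis", "accounting", "excel", "financial modeling"]),
   ("marketing", ["digital marketing", "seo", "social media", "marketing"]),
   ("design", ["photoshop", "illustrator", "ui/ux", "design"])]

-- ===== PORT A =====
-- A's score = sum(1 for indicator in indicators if any(indicator in skill for skill in skills_lower))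
def pvFieldScore (indicators : List String) (skillsLower : List String) : Int :=
  indicators.foldl
    (fun acc ind => if skillsLower.any (fun sk => PySem.Str.isIn ind sk) then acc + 1 else acc) 0

def infer_field_from_skills_py (skills : List String) : Option String :=
  let skillsLower := skills.map PySem.Str.lower
  let fieldScores : PySem.Dict String Int :=
    pvFieldIndicators.foldl
      (fun d p =>
        let score := pvFieldScore p.2 skillsLower
        if score > 0 then d.insert p.1 score else d)
      PySem.Dict.empty
  if fieldScores.size > 0 then
    PySem.List.max? fieldScores.keys (fun k => fieldScores.getD k 0)
  else
    none

-- ===== PORT B =====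
-- all_indicators = list(dict.fromkeys(ind for inds in field_indicators.values() for ind in inds))
def pvAllIndicators : List String :=
  PySem.List.dedup (pvFieldIndicators.flatMap Prod.snd)

def infer_field_from_skills_py_alt (skills : List String) : Option String :=
  -- Phase 1: skill-major pass building the set of matched distinct indicators
  let matched : PySem.Set String :=
    skills.foldl
      (fun m skill =>
        let sk := PySem.Str.lower skill
        pvAllIndicators.foldl
          (fun m ind => if PySem.Str.isIn ind sk then PySem.Set.add m ind else m) m)
      PySem.Set.empty
  -- Phase 2: score fields by membership in matched, keep first strict maximum
  (pvFieldIndicators.foldl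
      (fun acc p =>
        let score := p.2.foldl
          (fun a i => if PySem.Set.contains matched i then a + 1 else a) (0 : Int)
        if score > acc.2 then (some p.1, score) else acc)
      ((none : Option String), (0 : Int))).1

-- ===== PRECONDITION & SPEC =====
def Spec_infer_field_from_skills_py (skills : List String) (out : Option String) : Prop := out = infer_field_from_skills_py_alt skills
instance (skills : List String) (out : Option String) : Decidable (Spec_infer_field_from_skills_py skills out) := by unfold Spec_infer_field_from_skills_py; infer_instance

-- ===== CLAIM (what is proved, stated in full; the proofs are below) =====
def Claim_equal_infer_field_from_skills_py : Prop := ∀ (skills : List String), Dom_infer_field_from_skills_py skills → Spec_infer_field_from_skills_py skills (infer_field_from_skills_py skills)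

-- ===== LEMMAS AND PROOFS =====

-- the max?-with-key-snd fold step (the common reference both ports are reduced to)
def pvMStep (acc : Option (String × Int)) (p : String × Int) : Option (String × Int) :=
  match acc with
  | none => some p
  | some m => if m.2 < p.2 then some p else some m

-- scores are counts, hence nonnegative
lemma pvFieldScore_nonneg (inds sl : List String) : 0 ≤ pvFieldScore inds sl := by
  unfold pvFieldScore
  suffices h : ∀ (l : List String) (a : Int), 0 ≤ a →
      0 ≤ l.foldl (fun acc ind => if sl.any (fun sk => PySem.Str.isIn ind sk) then acc + 1 else acc) a by
    exact h inds 0 le_rfl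
  intro l
  induction l with
  | nil => intro a ha; simpa using ha
  | cons x t ih =>
      intro a ha
      simp only [List.foldl_cons]
      split
      · exact ih _ (by omega)
      · exact ih _ ha

-- membership in one inner pass of B's phase 1 (over one skill)
lemma pv_inner_mem (sk : String) (l : List String) (m : PySem.Set String) (x : String) :
    x ∈ l.foldl (fun m ind => if PySem.Str.isIn ind sk then PySem.Set.add m ind else m) m ↔
      x ∈ m ∨ (x ∈ l ∧ PySem.Str.isIn x sk) := by
  induction l generalizing m with
  | nil => simp
  | cons a t ih =>
      simp only [List.foldl_cons]
      by_cases h : PySem.Str.isIn a sk = true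
      · rw [if_pos h, ih]
        constructor
        · rintro (hm | ht)
          · rcases (PySem.Set.mem_add _ _ _).1 hm with hm | rfl
            · exact Or.inl hm
            · exact Or.inr ⟨by simp, h⟩
          · exact Or.inr ⟨by simp [ht.1], ht.2⟩
        · rintro (hm | ⟨hx, hi⟩)
          · exact Or.inl ((PySem.Set.mem_add _ _ _).2 (Or.inl hm))
          · rcases List.mem_cons.1 hx with rfl | hx
            · exact Or.inl ((PySem.Set.mem_add _ _ _).2 (Or.inr rfl))
            · exact Or.inr ⟨hx, hi⟩
      · rw [if_neg h, ih]
        constructor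
        · rintro (hm | ht)
          · exact Or.inl hm
          · exact Or.inr ⟨by simp [ht.1], ht.2⟩
        · rintro (hm | ⟨hx, hi⟩)
          · exact Or.inl hm
          · rcases List.mem_cons.1 hx with rfl | hx
            · exact absurd hi h
            · exact Or.inr ⟨hx, hi⟩

-- membership in B's matched set after phase 1
lemma pv_matched_mem (skills : List String) (m : PySem.Set String) (x : String) :
    x ∈ skills.foldl
        (fun m skill =>
          pvAllIndicators.foldl
            (fun m ind => if PySem.Str.isIn ind (PySem.Str.lower skill) then PySem.Set.add m ind else m) m)
        m ↔
      x ∈ m ∨ (x ∈ pvAllIndicators ∧ ∃ s ∈ skills, PySem.Str.isIn x (PySem.Str.lower s)) := by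
  induction skills generalizing m with
  | nil => simp
  | cons s t ih =>
      simp only [List.foldl_cons]
      rw [ih]
      rw [pv_inner_mem]
      constructor
      · rintro ((hm | ⟨hx, hi⟩) | ⟨hx, y, hy, hiy⟩)
        · exact Or.inl hm
        · exact Or.inr ⟨hx, s, by simp, hi⟩
        · exact Or.inr ⟨hx, y, by simp [hy], hiy⟩
      · rintro (hm | ⟨hx, y, hy, hiy⟩)
        · exact Or.inl (Or.inl hm)
        · rcases List.mem_cons.1 hy with rfl | hy
          · exact Or.inl (Or.inr ⟨hx, hiy⟩)
          · exact Or.inr ⟨hx, y, hy, hiy⟩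

-- counting by membership in a set whose membership test agrees with A's any-skill test
lemma pv_score_eq (sl : List String) (M : PySem.Set String) (inds : List String)
    (hM : ∀ x ∈ inds, PySem.Set.contains M x = sl.any (fun sk => PySem.Str.isIn x sk)) :
    inds.foldl (fun a i => if PySem.Set.contains M i then a + 1 else a) (0 : Int)
      = pvFieldScore inds sl := by
  unfold pvFieldScore
  apply PySem.List.foldl_congr_mem'
  intro i hi a
  rw [hM i hi]

-- A's conditional-insert loop builds exactly the positive entries, in order
lemma pv_dict_items (l : List (String × Int)) (hnd : (l.map Prod.fst).Nodup) :
    (l.foldl (fun d p => if p.2 > 0 then d.insert p.1 p.2 else d)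
        (PySem.Dict.empty : PySem.Dict String Int)).items
      = l.filter (fun p => decide (p.2 > 0)) := by
  have hstep : ∀ (l : List (String × Int)) (d : PySem.Dict String Int),
      l.foldl (fun d p => if p.2 > 0 then d.insert p.1 p.2 else d) d
        = (l.filter (fun p => decide (p.2 > 0))).foldl (fun d p => d.insert p.1 p.2) d := by
    intro l
    induction l with
    | nil => intro d; rfl
    | cons x t ih =>
        intro d
        by_cases hx : x.2 > 0 <;> simp [hx, ih]
  rw [hstep]
  have hfun : (fun (d : PySem.Dict String Int) (p : String × Int) => d.insert p.1 p.2)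
      = fun d p => d.insert (Prod.fst p) (Prod.snd p) := rfl
  rw [hfun, PySem.Dict.items_foldl_insert_fresh _ Prod.fst Prod.snd _
      (by simp [PySem.Dict.contains_empty])
      (((List.filter_sublist).map Prod.fst).nodup hnd)]
  simp [PySem.Dict.empty]

-- A's max?-over-keys fold mirrors the pvMStep fold over the items, given faithful lookups
lemma pv_max_keys_aux (d : PySem.Dict String Int) (l : List (String × Int))
    (macc : Option (String × Int))
    (hmem : ∀ p ∈ l, d.getD p.1 0 = p.2) (hacc : ∀ p, macc = some p → d.getD p.1 0 = p.2) :
    (l.map Prod.fst).foldl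
        (fun acc k =>
          match acc with
          | none => some k
          | some m => if d.getD m 0 < d.getD k 0 then some k else some m)
        (Option.map Prod.fst macc)
      = Option.map Prod.fst (l.foldl pvMStep macc) := by
  induction l generalizing macc with
  | nil => simp
  | cons p t ih =>
      simp only [List.map_cons, List.foldl_cons]
      have hp := hmem p (by simp)
      have hmem' : ∀ q ∈ t, d.getD q.1 0 = q.2 := fun q hq => hmem q (by simp [hq])
      cases macc with
      | none =>
          have hstep : pvMStep none p = some p := rfl
          rw [hstep]
          exact ih (some p) hmem' (fun q hq => by cases hq; exact hp)
      | some m =>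
          have hm := hacc m rfl
          simp only [Option.map_some, hm, hp, pvMStep]
          by_cases hlt : m.2 < p.2
          · simp only [if_pos hlt]
            exact ih (some p) hmem' (fun q hq => by cases hq; exact hp)
          · simp only [if_neg hlt]
            exact ih (some m) hmem' (fun q hq => by cases hq; exact hm)

-- B's strict-'>' fold mirrors the pvMStep fold over the positive entries
lemma pv_best_aux (l : List (String × Int))
    (macc : Option (String × Int))
    (hpos : ∀ p ∈ l, 0 ≤ p.2)
    (h3 : ∀ p, macc = some p → 0 < p.2) :
    (l.foldl (fun acc p => if p.2 > acc.2 then (some p.1, p.2) else acc)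
        (Option.map Prod.fst macc, macc.elim 0 Prod.snd)).1
      = Option.map Prod.fst ((l.filter (fun p => decide (p.2 > 0))).foldl pvMStep macc) := by
  induction l generalizing macc with
  | nil => simp
  | cons p t ih =>
      simp only [List.foldl_cons, List.filter_cons]
      have hp0 := hpos p (by simp)
      have hpos' : ∀ q ∈ t, 0 ≤ q.2 := fun q hq => hpos q (by simp [hq])
      by_cases hgt0 : p.2 > 0
      · simp only [hgt0, decide_true, if_true, List.foldl_cons]
        cases macc with
        | none =>
            simp only [Option.map_none, Option.elim_none, if_pos (by simpa using hgt0)]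
            have hstep : pvMStep none p = some p := rfl
            rw [hstep]
            have := ih (some p) hpos' (fun q hq => by cases hq; exact hgt0)
            simpa using this
        | some m =>
            have hm := h3 m rfl
            simp only [Option.map_some, Option.elim_some]
            by_cases hlt : m.2 < p.2
            · simp only [pvMStep, if_pos hlt]
              have := ih (some p) hpos' (fun q hq => by cases hq; exact hgt0)
              simpa using this
            · have hgt : ¬ p.2 > m.2 := hlt
              simp only [if_neg hgt, pvMStep]
              have := ih (some m) hpos' (fun q hq => by cases hq; exact hm)
              simpa using this
      · have hno : ¬ p.2 > (Option.map Prod.fst macc, macc.elim 0 Prod.snd).2 := by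
          cases macc with
          | none => simpa using by omega
          | some m => have := h3 m rfl; simp only [Option.elim_some]; omega
        simp only [hgt0, decide_false, if_neg hno]
        exact ih macc hpos' h3

-- ===== VERDICT (by name: the statement is the Claim_ definition above) =====
theorem infer_field_from_skills_py_spec : Claim_equal_infer_field_from_skills_py := by
  intro skills _
  unfold Spec_infer_field_from_skills_py infer_field_from_skills_py infer_field_from_skills_py_alt
  dsimp only []
  set sl := skills.map PySem.Str.lower with hsl
  set L : List (String × Int) := pvFieldIndicators.map (fun p => (p.1, pvFieldScore p.2 sl)) with hL
  -- B's phase-2 fold computes the same scores as pvFieldScore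
  have hscores : ∀ p ∈ pvFieldIndicators,
      p.2.foldl
          (fun a i => if PySem.Set.contains
              (skills.foldl
                (fun m skill =>
                  pvAllIndicators.foldl
                    (fun m ind => if PySem.Str.isIn ind (PySem.Str.lower skill) then PySem.Set.add m ind else m) m)
                PySem.Set.empty) i then a + 1 else a) (0 : Int)
        = pvFieldScore p.2 sl := by
    intro p hp
    apply pv_score_eq
    intro x hx
    have hxall : x ∈ pvAllIndicators := by
      unfold pvAllIndicators
      rw [PySem.List.mem_dedup]
      exact List.mem_flatMap.2 ⟨p, hp, hx⟩
    rw [Bool.eq_iff_iff, PySem.Set.contains_iff, pv_matched_mem]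
    constructor
    · rintro (hc | ⟨_, y, hy, hiy⟩)
      · exact absurd hc (by simp [PySem.Set.empty])
      · rw [hsl]
        exact List.any_eq_true.2 ⟨PySem.Str.lower y, List.mem_map.2 ⟨y, hy, rfl⟩, hiy⟩
    · intro hc
      rw [hsl] at hc
      obtain ⟨sk, hsk, hh⟩ := List.any_eq_true.1 hc
      obtain ⟨y, hy, rfl⟩ := List.mem_map.1 hsk
      exact Or.inr ⟨hxall, y, hy, by simpa using hh⟩
  have hfoldA : pvFieldIndicators.foldl
      (fun d p => let score := pvFieldScore p.2 sl; if score > 0 then d.insert p.1 score else d)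
      (PySem.Dict.empty : PySem.Dict String Int)
      = L.foldl (fun d q => if q.2 > 0 then d.insert q.1 q.2 else d) PySem.Dict.empty := by
    rw [hL, List.foldl_map]
  have hfoldB : pvFieldIndicators.foldl
      (fun acc p =>
        let score := p.2.foldl
          (fun a i => if PySem.Set.contains
              (skills.foldl
                (fun m skill =>
                  pvAllIndicators.foldl
                    (fun m ind => if PySem.Str.isIn ind (PySem.Str.lower skill) then PySem.Set.add m ind else m) m)
                PySem.Set.empty) i then a + 1 else a) (0 : Int)
        if score > acc.2 then (some p.1, score) else acc)
      ((none : Option String), (0 : Int))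
      = L.foldl (fun acc q => if q.2 > acc.2 then (some q.1, q.2) else acc) ((none : Option String), (0:Int)) := by
    rw [hL, List.foldl_map]
    apply PySem.List.foldl_congr_mem'
    intro p hp acc
    rw [hscores p hp]
  have hndL : (L.map Prod.fst).Nodup := by
    have hx : L.map Prod.fst = pvFieldIndicators.map Prod.fst := by rw [hL, List.map_map]; rfl
    rw [hx]; decide
  have hpos : ∀ p ∈ L, 0 ≤ p.2 := by
    intro p hp
    rw [hL] at hp
    obtain ⟨q, hq, rfl⟩ := List.mem_map.1 hp
    exact pvFieldScore_nonneg _ _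
  rw [hfoldA, hfoldB]
  set d := L.foldl (fun d q => if q.2 > 0 then d.insert q.1 q.2 else d) PySem.Dict.empty with hd
  set lf := L.filter (fun p => decide (p.2 > 0)) with hlf
  have hitems : d.items = lf := pv_dict_items L hndL
  have hkeys : d.keys = lf.map Prod.fst := by
    simp [PySem.Dict.keys, hitems]
  have hkeysnd : d.keys.Nodup := by
    rw [hkeys]
    exact ((List.filter_sublist).map Prod.fst).nodup hndL
  have hlook : ∀ p ∈ lf, d.getD p.1 0 = p.2 := by
    intro p hp
    have hin : (p.1, p.2) ∈ d.items := by rw [hitems]; simpa using hp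
    have hg := PySem.Dict.get?_of_mem_items d hin hkeysnd
    simp [PySem.Dict.getD_eq_get?_getD, hg]
  have hB : (L.foldl (fun acc q => if q.2 > acc.2 then (some q.1, q.2) else acc)
      ((none : Option String), (0:Int))).1 = Option.map Prod.fst (lf.foldl pvMStep none) := by
    have h := pv_best_aux L none hpos (by intro p h; cases h)
    simpa [hlf] using h
  have hA : PySem.List.max? d.keys (fun k => d.getD k 0) = Option.map Prod.fst (lf.foldl pvMStep none) := by
    rw [hkeys]
    have h := pv_max_keys_aux d lf none hlook (by intro p h; cases h)
    unfold PySem.List.max?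
    beta_reduce
    simp only [Option.map_none] at h
    convert h using 2
    funext acc x
    cases acc <;> rfl
  by_cases h0 : lf = []
  · have hsz : d.size = 0 := by simp [PySem.Dict.size, hitems, h0]
    simp [hsz, hB, h0]
  · have hsz : d.size > 0 := by
      simp only [PySem.Dict.size, hitems]
      exact List.length_pos_iff.2 h0
    simp [hsz, hB, hA]
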